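-- pv_equiv track=rewrite | github.com/alex-yung-github/ML-Work | machine learning work/3.1 DecisionTrees/dt.py | getIfPure
-- ===== SOURCE A (Python) =====
-- def getIfPure(classtup):
--     index = None
--     for i in range(len(classtup)):
--         num = classtup[i]
--         if(num != 0):
--             if(index == None):
--                 index = i
--             else:
--                 return None
--     return index
-- ===== SOURCE B (Python) =====
-- def getIfPure(classtup):
--     if len(classtup) - classtup.count(0) != 1:
--         return None
--     for i, x in enumerate(classtup):
--         if x != 0:
--             return i
-- ===== Notes on version B (the rewrite author's own statement) =====
-- stated objective: alternative
-- what changed: Replaces A's single-accumulator early-return index loop with two staged passes: first count the zeros to decide whether exactly one element is nonzero, and only then linearly search for the index of that first nonzero.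
import Mathlib
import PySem

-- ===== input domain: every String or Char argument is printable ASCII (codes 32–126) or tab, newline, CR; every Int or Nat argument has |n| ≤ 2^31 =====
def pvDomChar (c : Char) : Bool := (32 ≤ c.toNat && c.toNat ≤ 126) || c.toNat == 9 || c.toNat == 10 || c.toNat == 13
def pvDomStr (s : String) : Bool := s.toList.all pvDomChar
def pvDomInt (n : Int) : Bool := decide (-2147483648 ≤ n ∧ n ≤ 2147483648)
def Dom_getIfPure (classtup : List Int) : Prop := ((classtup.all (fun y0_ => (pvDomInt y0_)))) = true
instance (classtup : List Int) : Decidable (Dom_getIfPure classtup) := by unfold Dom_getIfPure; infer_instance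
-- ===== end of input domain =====

-- B splits the task into two staged passes — count the zeros to test 'exactly one
-- nonzero', then search for that nonzero's index — instead of A's one
-- accumulator-carrying early-return pass; objective: alternative, same O(n).

-- ===== PORT A =====
-- A's for-loop over range(len(classtup)) with accumulator `index` and an early
-- `return None` on the second nonzero; ported as structural recursion carrying
-- the current position i and the accumulator.
def getIfPureLoopA : List Int → Int → Option Int → Option Int
  | [], _, index => index
  | num :: rest, i, index =>
    if num ≠ 0 then
      match index with
      | none => getIfPureLoopA rest (i + 1) (some i)
      | some _ => none
    else getIfPureLoopA rest (i + 1) index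

def getIfPure (classtup : List Int) : Option Int :=
  getIfPureLoopA classtup 0 none

-- ===== PORT B =====
-- if len(classtup) - classtup.count(0) != 1: return None
-- for i, x in enumerate(classtup):
--     if x != 0: return i
-- (the search loop, with Python's implicit `return None` when it falls through)
def getIfPureFindB : List Int → Int → Option Int
  | [], _ => none
  | x :: rest, i => if x ≠ 0 then some i else getIfPureFindB rest (i + 1)

def getIfPure_alt (classtup : List Int) : Option Int :=
  if (classtup.length : Int) - PySem.List.count classtup 0 ≠ 1 then none
  else getIfPureFindB classtup 0

-- ===== PRECONDITION & SPEC =====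
def Spec_getIfPure (classtup : List Int) (out : Option Int) : Prop := out = getIfPure_alt classtup
instance (classtup : List Int) (out : Option Int) : Decidable (Spec_getIfPure classtup out) := by unfold Spec_getIfPure; infer_instance

-- ===== CLAIM =====
def Claim_equal_getIfPure : Prop := ∀ (classtup : List Int), Dom_getIfPure classtup → Spec_getIfPure classtup (getIfPure classtup)

-- ===== LEMMAS AND PROOFS =====

-- once the accumulator holds an index, A returns it iff the rest is all zero
theorem loopA_some (l : List Int) : ∀ (i k : Int),
    getIfPureLoopA l i (some k) =
      if l.countP (fun x => x ≠ 0) = 0 then some k else none := by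
  induction l with
  | nil => intro i k; simp [getIfPureLoopA]
  | cons num rest ih =>
    intro i k
    by_cases hnum : num = 0
    · subst hnum; simp [getIfPureLoopA, ih]
    · simp [getIfPureLoopA, hnum]

-- with empty accumulator, A returns the first nonzero index iff exactly one nonzero
theorem loopA_none (l : List Int) : ∀ (i : Int),
    getIfPureLoopA l i none =
      if l.countP (fun x => x ≠ 0) = 1 then getIfPureFindB l i else none := by
  induction l with
  | nil => intro i; simp [getIfPureLoopA]
  | cons num rest ih =>
    intro i
    by_cases hnum : num = 0
    · subst hnum; simp [getIfPureLoopA, getIfPureFindB, ih]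
    · simp [getIfPureLoopA, getIfPureFindB, hnum, loopA_some]

-- length minus the zero count is the nonzero count
theorem len_sub_count (l : List Int) :
    (l.length : Int) - PySem.List.count l 0 = (l.countP (fun x => x ≠ 0) : Int) := by
  induction l with
  | nil => simp [PySem.List.count]
  | cons x rest ih =>
    by_cases hx : x = 0 <;> simp [PySem.List.count, hx] at * <;> omega

-- ===== VERDICT =====
theorem getIfPure_spec : Claim_equal_getIfPure := by
  intro classtup _
  unfold Spec_getIfPure getIfPure getIfPure_alt
  rw [len_sub_count, loopA_none]
  by_cases h : classtup.countP (fun x => x ≠ 0) = 1 <;> simp [h]  -- both branches reduce the two ifs
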